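-- pv_equiv track=rewrite | github.com/kimerein/sabatinilab-glm | sglm/sglm/features/setup_model_fit.py | xy_pairs_to_widest_orders
-- ===== SOURCE A (Python) =====
-- def xy_pairs_to_widest_orders(X_y_pairings):
--     """
--     """
--     widest_shifts = {}
--     for xy_pair in X_y_pairings:
--         X_dict = xy_pair['X_cols']
--         for X_col in X_dict:
--             neg_order, pos_order = (X_dict[X_col][0], X_dict[X_col][1])
--
--             if X_col not in widest_shifts:
--                 widest_shifts[X_col] = (neg_order, pos_order)
--                 continue
--
--             most_neg_order, most_pos_order = widest_shifts[X_col]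
--
--             if most_neg_order > neg_order:
--                 most_neg_order = neg_order
--             if most_pos_order < pos_order:
--                 most_pos_order = pos_order
--
--             widest_shifts[X_col] = (most_neg_order, most_pos_order)
--
--     return widest_shifts
-- ===== SOURCE B (Python) =====
-- def xy_pairs_to_widest_orders(X_y_pairings):
--     # Phase 1: gather every (neg_order, pos_order) pair per X column, in
--     # first-appearance order.
--     gathered = {}
--     for xy_pair in X_y_pairings:
--         X_dict = xy_pair['X_cols']
--         for X_col in X_dict:
--             gathered.setdefault(X_col, []).append(X_dict[X_col])
--     # Phase 2: reduce each column's pairs to (min neg, max pos).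
--     return {X_col: (min(o[0] for o in orders), max(o[1] for o in orders))
--             for X_col, orders in gathered.items()}
-- ===== Notes on version B (the rewrite author's own statement) =====
-- stated objective: alternative
-- what changed: Replaces A's fused streaming min/max update of a single dict with a two-phase gather-then-reduce: first build a dict from each X column to the list of all its (neg, pos) order pairs, then map each column's list to (min of negs, max of poss).
import Mathlib
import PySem

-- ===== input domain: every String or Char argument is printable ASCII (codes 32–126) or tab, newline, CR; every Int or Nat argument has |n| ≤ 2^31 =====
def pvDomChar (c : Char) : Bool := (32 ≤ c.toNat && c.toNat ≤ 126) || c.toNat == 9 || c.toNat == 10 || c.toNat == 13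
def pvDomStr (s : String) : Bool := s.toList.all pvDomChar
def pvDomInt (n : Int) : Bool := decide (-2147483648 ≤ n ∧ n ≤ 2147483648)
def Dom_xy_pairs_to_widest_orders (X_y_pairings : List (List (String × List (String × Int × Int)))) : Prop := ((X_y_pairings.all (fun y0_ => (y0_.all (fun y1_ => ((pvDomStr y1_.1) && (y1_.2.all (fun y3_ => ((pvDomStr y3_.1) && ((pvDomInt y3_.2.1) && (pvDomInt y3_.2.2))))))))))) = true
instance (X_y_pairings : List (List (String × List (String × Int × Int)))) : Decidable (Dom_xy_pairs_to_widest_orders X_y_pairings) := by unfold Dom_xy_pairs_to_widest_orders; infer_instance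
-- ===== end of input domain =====

-- B replaces A's fused streaming min/max update with a two-phase gather-then-reduce:
-- collect all (neg, pos) pairs per column first, then take min/max per column.

-- ===== PORT A =====
-- A's inner loop body: streaming update of widest_shifts at key p.1 ([0]/[1] are .1/.2 of the value)
def pvStepA (d : PySem.Dict String (Int × Int)) (p : String × Int × Int) :
    PySem.Dict String (Int × Int) :=
  match d.get? p.1 with
  | none => d.insert p.1 (p.2.1, p.2.2)
  | some (mn, mp) =>
      d.insert p.1 ((if mn > p.2.1 then p.2.1 else mn), (if mp < p.2.2 then p.2.2 else mp))

def xy_pairs_to_widest_orders (X_y_pairings : List (List (String × List (String × Int × Int)))) : List (String × Int × Int) :=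
  (X_y_pairings.foldl (fun widest xy_pair =>
      -- xy_pair['X_cols'] raises KeyError when the key is absent: those inputs are outside Pre_
      -- (the .getD [] fallback is never reached inside Pre_)
      let X_dict := PySem.Dict.ofList (((PySem.Dict.ofList xy_pair).get? "X_cols").getD [])
      -- 'for X_col in X_dict' with lookups X_dict[X_col]: items pairs each key with its value
      X_dict.items.foldl pvStepA widest)
    PySem.Dict.empty).items

-- ===== PORT B =====
-- phase 2: one gathered column reduced to (min of neg orders, max of pos orders);
-- the .getD 0 defaults are unreachable (every gathered list is nonempty)
def pvReduce (p : String × List (Int × Int)) : String × Int × Int :=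
  (p.1, (PySem.List.min? (p.2.map (fun o => o.1)) (fun y => y)).getD 0,
        (PySem.List.max? (p.2.map (fun o => o.2)) (fun y => y)).getD 0)

def xy_pairs_to_widest_orders_alt (X_y_pairings : List (List (String × List (String × Int × Int)))) : List (String × Int × Int) :=
  -- phase 1: gather every (neg, pos) pair per column (setdefault(...,[]).append = modify with default [])
  (((X_y_pairings.foldl (fun g xy_pair =>
      let X_dict := PySem.Dict.ofList (((PySem.Dict.ofList xy_pair).get? "X_cols").getD [])
      X_dict.items.foldl (fun g p => g.modify p.1 [] (fun os => os ++ [p.2])) g)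
    PySem.Dict.empty).items).map pvReduce)

-- ===== PRECONDITION & SPEC =====
-- Pre_ excludes exactly the inputs on which xy_pair['X_cols'] raises KeyError (in A and in B alike)
def Pre_xy_pairs_to_widest_orders (X_y_pairings : List (List (String × List (String × Int × Int)))) : Prop :=
  ∀ xy_pair ∈ X_y_pairings, ∃ p ∈ xy_pair, p.1 = "X_cols"
instance (X_y_pairings : List (List (String × List (String × Int × Int)))) : Decidable (Pre_xy_pairs_to_widest_orders X_y_pairings) := by unfold Pre_xy_pairs_to_widest_orders; infer_instance

def pvWitness_xy_pairs_to_widest_orders : (List (List (String × List (String × Int × Int)))) :=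
  [[("X_cols", [("a", -1, 2), ("b", 0, 0)])], [("X_cols", [("a", -3, 1)])]]

def Spec_xy_pairs_to_widest_orders (X_y_pairings : List (List (String × List (String × Int × Int)))) (out : List (String × Int × Int)) : Prop := out = xy_pairs_to_widest_orders_alt X_y_pairings
instance (X_y_pairings : List (List (String × List (String × Int × Int)))) (out : List (String × Int × Int)) : Decidable (Spec_xy_pairs_to_widest_orders X_y_pairings out) := by unfold Spec_xy_pairs_to_widest_orders; infer_instance

-- ===== CLAIM (what is proved, stated in full; the proofs are below) =====
def Claim_equal_xy_pairs_to_widest_orders : Prop := ∀ (X_y_pairings : List (List (String × List (String × Int × Int)))), Dom_xy_pairs_to_widest_orders X_y_pairings → Pre_xy_pairs_to_widest_orders X_y_pairings → Spec_xy_pairs_to_widest_orders X_y_pairings (xy_pairs_to_widest_orders X_y_pairings)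

-- ===== LEMMAS AND PROOFS =====
-- The ports are in fact equal on ALL inputs (the unreachable-in-Python .getD [] fallbacks coincide),
-- so the proof below does not need the Pre_ hypothesis; Pre_ marks where the Pythons raise.

-- A's per-column running state, as a fold over that column's occurrences
def pvMerge (acc : Option (Int × Int)) (o : Int × Int) : Option (Int × Int) :=
  match acc with
  | none => some o
  | some (a, b) => some ((if a > o.1 then o.1 else a), (if b < o.2 then o.2 else b))

-- the value pvStepA inserts, exposing pvStepA as a single insert (for the keys lemmas)
def pvValA (d : PySem.Dict String (Int × Int)) (p : String × Int × Int) : Int × Int :=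
  match d.get? p.1 with
  | none => (p.2.1, p.2.2)
  | some (mn, mp) => ((if mn > p.2.1 then p.2.1 else mn), (if mp < p.2.2 then p.2.2 else mp))

theorem pv_foldl_flatMap {α β σ : Type} (l : List α) (f : α → List β) (g : σ → β → σ) (init : σ) :
    l.foldl (fun a x => (f x).foldl g a) init = (l.flatMap f).foldl g init := by
  induction l generalizing init with
  | nil => rfl
  | cons x xs ih => simp [List.flatMap_cons, List.foldl_append, ih]

theorem pvA_get? (l : List (String × Int × Int)) (d : PySem.Dict String (Int × Int)) (c : String) :
    (l.foldl pvStepA d).get? c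
      = ((l.filter (fun p => p.1 == c)).map (fun p => p.2)).foldl pvMerge (d.get? c) := by
  induction l generalizing d with
  | nil => rfl
  | cons p t ih =>
    simp only [List.foldl_cons, ih, List.filter_cons]
    by_cases hc : p.1 = c
    · have h1 : (pvStepA d p).get? c = pvMerge (d.get? c) p.2 := by
        subst hc
        unfold pvStepA pvMerge
        cases h : d.get? p.1 with
        | none => simp [PySem.Dict.get?_insert_self]
        | some v => cases v; simp [PySem.Dict.get?_insert_self]
      simp [hc, h1]
    · have h1 : (pvStepA d p).get? c = d.get? c := by
        unfold pvStepA
        cases h : d.get? p.1 with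
        | none => exact PySem.Dict.get?_insert_of_ne d _ (fun he => hc he.symm)
        | some v => cases v; exact PySem.Dict.get?_insert_of_ne d _ (fun he => hc he.symm)
      simp [hc, h1]

theorem pvMerge_some (t : List (Int × Int)) (a b : Int) :
    t.foldl pvMerge (some (a, b))
      = some ((t.map (fun o => o.1)).foldl min a, (t.map (fun o => o.2)).foldl max b) := by
  induction t generalizing a b with
  | nil => rfl
  | cons o t ih =>
    simp only [List.foldl_cons, List.map_cons]
    rw [show pvMerge (some (a, b)) o = some (min a o.1, max b o.2) by
      simp only [pvMerge]
      have h1 : (if a > o.1 then o.1 else a) = min a o.1 := by simp [min_def]; omega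
      have h2 : (if b < o.2 then o.2 else b) = max b o.2 := by simp [max_def]; omega
      rw [h1, h2]]
    exact ih _ _

theorem pvStepA_insert : pvStepA = fun d p => d.insert p.1 (pvValA d p) := by
  funext d p
  unfold pvStepA pvValA
  cases h : d.get? p.1 with
  | none => simp
  | some v => cases v; simp

theorem pvKeysA (S : List (String × Int × Int)) :
    (S.foldl pvStepA PySem.Dict.empty).keys = PySem.Set.ofList (S.map (fun p => p.1)) := by
  rw [pvStepA_insert, PySem.Dict.keys_foldl_insert_key S (fun p => p.1) pvValA,
      PySem.Dict.keys_empty, PySem.Set.update_nil_left]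

theorem pvNodupA (S : List (String × Int × Int)) :
    (S.foldl pvStepA PySem.Dict.empty).keys.Nodup := by
  rw [pvStepA_insert]
  exact PySem.Dict.nodup_keys_foldl_insert_key S (fun p => p.1) pvValA _ PySem.Dict.nodup_keys_empty

theorem pvKeysG (S : List (String × Int × Int)) :
    ((S.foldl (fun g p => g.modify p.1 [] (fun os => os ++ [p.2])) (PySem.Dict.empty : PySem.Dict String (List (Int × Int)))).keys) = PySem.Set.ofList (S.map (fun p => p.1)) := by
  rw [PySem.Dict.keys_foldl_modify_key S (fun p => p.1) (d0 := []) (f := fun g p => (fun os => os ++ [p.2])),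
      PySem.Dict.keys_empty, PySem.Set.update_nil_left]

theorem pvNodupG (S : List (String × Int × Int)) :
    ((S.foldl (fun g p => g.modify p.1 [] (fun os => os ++ [p.2])) (PySem.Dict.empty : PySem.Dict String (List (Int × Int)))).keys).Nodup := by
  exact PySem.Dict.nodup_keys_foldl_modify_key S (fun p => p.1) [] (fun g p => (fun os => os ++ [p.2])) _ PySem.Dict.nodup_keys_empty

theorem pvGetDG (S : List (String × Int × Int)) (c : String) :
    ((S.foldl (fun g p => g.modify p.1 [] (fun os => os ++ [p.2])) (PySem.Dict.empty : PySem.Dict String (List (Int × Int)))).getD c []) = (S.filter (fun p => p.1 == c)).map (fun p => p.2) := by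
  rw [PySem.Dict.getD_foldl_modify_append, PySem.Dict.getD_empty]
  simp

theorem pv_main (X_y_pairings : List (List (String × List (String × Int × Int)))) :
    xy_pairs_to_widest_orders X_y_pairings = xy_pairs_to_widest_orders_alt X_y_pairings := by
  unfold xy_pairs_to_widest_orders xy_pairs_to_widest_orders_alt
  simp only []
  rw [pv_foldl_flatMap X_y_pairings
        (fun xy_pair => (PySem.Dict.ofList (((PySem.Dict.ofList xy_pair).get? "X_cols").getD [])).items)
        pvStepA PySem.Dict.empty,
      pv_foldl_flatMap X_y_pairings
        (fun xy_pair => (PySem.Dict.ofList (((PySem.Dict.ofList xy_pair).get? "X_cols").getD [])).items)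
        (fun (g : PySem.Dict String (List (Int × Int))) p => g.modify p.1 [] (fun os => os ++ [p.2])) PySem.Dict.empty]
  set S := X_y_pairings.flatMap
    (fun xy_pair => (PySem.Dict.ofList (((PySem.Dict.ofList xy_pair).get? "X_cols").getD [])).items) with hS
  rw [PySem.Dict.items_eq_map_keys _ (pvNodupA S) ((0 : Int), (0 : Int)),
      PySem.Dict.items_eq_map_keys _ (pvNodupG S) ([] : List (Int × Int)),
      pvKeysA, pvKeysG, List.map_map]
  apply List.map_congr_left
  intro c hc
  -- c has at least one occurrence in S, so its gathered list is nonempty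
  have hmem : c ∈ S.map (fun p => p.1) := (PySem.Set.mem_ofList _ _).mp hc
  obtain ⟨p0, hp0, hp0c⟩ := List.mem_map.mp hmem
  have hocc : (S.filter (fun p => p.1 == c)).map (fun p : String × Int × Int => p.2) ≠ [] := by
    have : p0 ∈ S.filter (fun p => p.1 == c) := by
      simp [List.mem_filter, hp0, hp0c]
    intro h
    rw [List.map_eq_nil_iff] at h
    simp [h] at this
  rw [Function.comp_apply, pvGetDG]
  rw [PySem.Dict.getD_eq_get?_getD, pvA_get?, PySem.Dict.get?_empty]
  cases hocc' : (S.filter (fun p => p.1 == c)).map (fun p : String × Int × Int => p.2) with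
  | nil => exact absurd hocc' hocc
  | cons o t =>
    simp only [List.foldl_cons]
    have hmerge : pvMerge none o = some (o.1, o.2) := rfl
    rw [hmerge, pvMerge_some]
    unfold pvReduce
    simp only [List.map_cons, PySem.List.min?_id_cons, PySem.List.max?_id_cons, Option.getD_some]

-- ===== VERDICT (by name: the statement is the Claim_ definition above) =====
theorem xy_pairs_to_widest_orders_spec : Claim_equal_xy_pairs_to_widest_orders := by
  intro X_y_pairings _ _
  unfold Spec_xy_pairs_to_widest_orders
  exact pv_main X_y_pairings
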